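-- pv_equiv track=rewrite | github.com/TaeseokKim9148/KIM_Algorithm_Coding | 백준/Silver/9657. 돌 게임 3/돌 게임 3.py | stone
-- ===== SOURCE A (Python) =====
-- def stone(n):
--     dp = [0] * (n + 1)
--
--     dp[0] = 0
--     dp[1] = 1
--
--     for i in range(2, n+1):
--         if i >= 1 and dp[i-1] == 0:
--             dp[i] = 1
--         elif i >= 3 and dp[i-3] == 0:
--             dp[i] = 1
--         elif i >= 4 and dp[i-4] == 0:
--             dp[i] = 1
--         else:
--             dp[i] = 0
--
--     return dp[n]
-- ===== SOURCE B (Python) =====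
-- def stone(n):
--     return 0 if n % 7 in (0, 2) else 1
-- ===== Notes on version B (the rewrite author's own statement) =====
-- stated objective: faster
-- what changed: replaces the O(n) DP table over moves 1,3,4 with the closed-form periodicity of the game: the position is losing exactly when n % 7 is 0 or 2
import Mathlib
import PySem

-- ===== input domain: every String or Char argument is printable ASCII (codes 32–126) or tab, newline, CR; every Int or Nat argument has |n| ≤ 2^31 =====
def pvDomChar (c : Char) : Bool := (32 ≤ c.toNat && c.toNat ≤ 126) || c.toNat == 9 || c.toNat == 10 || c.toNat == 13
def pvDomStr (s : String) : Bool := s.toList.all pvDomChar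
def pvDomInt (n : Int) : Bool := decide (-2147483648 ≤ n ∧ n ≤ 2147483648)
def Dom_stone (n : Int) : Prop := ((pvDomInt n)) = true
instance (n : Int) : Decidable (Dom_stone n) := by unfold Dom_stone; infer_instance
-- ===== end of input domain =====

-- B replaces A's O(n) DP table over moves {1,3,4} with the O(1) period-7 closed form
-- (losing position iff n % 7 ∈ {0, 2}); proved equal on all n ≥ 1 (A raises IndexError otherwise).

-- ===== PORT A =====
-- literal transliteration of A's DP loop; dp[i] = … becomes pySetD, reads become pyGetD
-- (all indices are in range on Pre_, where Python does not raise).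
def stone (n : Int) : Int :=
  let dp : List Int := List.replicate (n + 1).toNat 0
  let dp := PySem.List.pySetD dp 0 0
  let dp := PySem.List.pySetD dp 1 1
  let dp := (PySem.List.pyRange 2 (n + 1) 1).foldl
    (fun dp i =>
      if 1 ≤ i ∧ PySem.List.pyGetD dp (i - 1) 0 = 0 then PySem.List.pySetD dp i 1
      else if 3 ≤ i ∧ PySem.List.pyGetD dp (i - 3) 0 = 0 then PySem.List.pySetD dp i 1
      else if 4 ≤ i ∧ PySem.List.pyGetD dp (i - 4) 0 = 0 then PySem.List.pySetD dp i 1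
      else PySem.List.pySetD dp i 0) dp
  PySem.List.pyGetD dp n 0

-- ===== PORT B =====
def stone_alt (n : Int) : Int :=
  if PySem.Int.mod n 7 = 0 ∨ PySem.Int.mod n 7 = 2 then 0 else 1

-- ===== PRECONDITION & SPEC =====
-- Pre_ excludes exactly n ≤ 0, where A raises IndexError (dp[1] on a table of size ≤ 1).
def Pre_stone (n : Int) : Prop := 1 ≤ n
instance (n : Int) : Decidable (Pre_stone n) := by unfold Pre_stone; infer_instance
def pvWitness_stone : Int := 7

def Spec_stone (n : Int) (out : Int) : Prop := out = stone_alt n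
instance (n : Int) (out : Int) : Decidable (Spec_stone n out) := by unfold Spec_stone; infer_instance

-- ===== CLAIM (what is proved, stated in full; the proofs are below) =====
def Claim_equal_stone : Prop := ∀ (n : Int), Dom_stone n → Pre_stone n → Spec_stone n (stone n)

-- ===== LEMMAS AND PROOFS =====

-- the closed-form value, as a function of the (nonnegative) position
def gWL (k : Int) : Int := if k % 7 = 0 ∨ k % 7 = 2 then 0 else 1

-- one step of A's branch chain computes gWL j, for j ≥ 2
lemma gWL_step (j : Int) (h2 : 2 ≤ j) :
    (if 1 ≤ j ∧ gWL (j - 1) = 0 then (1 : Int)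
     else if 3 ≤ j ∧ gWL (j - 3) = 0 then 1
     else if 4 ≤ j ∧ gWL (j - 4) = 0 then 1
     else 0) = gWL j := by
  simp only [gWL]
  split_ifs <;> omega

lemma stone_loop_inv (L : Nat) (m : Int) (hm : m ≤ (L : Int)) :
    ∀ (j : Int) (dp : List Int), 2 ≤ j → j ≤ m → dp.length = L →
      (∀ k : Nat, (k : Int) < j → dp.getD k 0 = gWL k) →
      (((PySem.List.pyRange j m 1).foldl
        (fun dp i =>
          if 1 ≤ i ∧ PySem.List.pyGetD dp (i - 1) 0 = 0 then PySem.List.pySetD dp i 1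
          else if 3 ≤ i ∧ PySem.List.pyGetD dp (i - 3) 0 = 0 then PySem.List.pySetD dp i 1
          else if 4 ≤ i ∧ PySem.List.pyGetD dp (i - 4) 0 = 0 then PySem.List.pySetD dp i 1
          else PySem.List.pySetD dp i 0) dp).length = L ∧
       ∀ k : Nat, (k : Int) < m →
        ((PySem.List.pyRange j m 1).foldl
          (fun dp i =>
            if 1 ≤ i ∧ PySem.List.pyGetD dp (i - 1) 0 = 0 then PySem.List.pySetD dp i 1
            else if 3 ≤ i ∧ PySem.List.pyGetD dp (i - 3) 0 = 0 then PySem.List.pySetD dp i 1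
            else if 4 ≤ i ∧ PySem.List.pyGetD dp (i - 4) 0 = 0 then PySem.List.pySetD dp i 1
            else PySem.List.pySetD dp i 0) dp).getD k 0 = gWL k) := by
  set F : List Int → Int → List Int := fun dp i =>
      if 1 ≤ i ∧ PySem.List.pyGetD dp (i - 1) 0 = 0 then PySem.List.pySetD dp i 1
      else if 3 ≤ i ∧ PySem.List.pyGetD dp (i - 3) 0 = 0 then PySem.List.pySetD dp i 1
      else if 4 ≤ i ∧ PySem.List.pyGetD dp (i - 4) 0 = 0 then PySem.List.pySetD dp i 1
      else PySem.List.pySetD dp i 0 with hF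
  suffices H : ∀ (fuel : Nat) (j : Int) (dp : List Int), (m - j).toNat ≤ fuel → 2 ≤ j → j ≤ m →
      dp.length = L → (∀ k : Nat, (k : Int) < j → dp.getD k 0 = gWL k) →
      (((PySem.List.pyRange j m 1).foldl F dp).length = L ∧
        ∀ k : Nat, (k : Int) < m → ((PySem.List.pyRange j m 1).foldl F dp).getD k 0 = gWL k) by
    intro j dp h2 hjm hlen hpre
    exact H (m - j).toNat j dp le_rfl h2 hjm hlen hpre
  intro fuel
  induction fuel with
  | zero =>
    intro j dp hf h2 hjm hlen hpre
    have hjm' : m ≤ j := by omega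
    rw [PySem.List.pyRange_one_eq_nil hjm']
    refine ⟨hlen, ?_⟩
    intro k hk
    exact hpre k (by omega)
  | succ fuel ih =>
    intro j dp hf h2 hjm hlen hpre
    by_cases hlt : j < m
    · rw [PySem.List.pyRange_one_cons hlt, List.foldl_cons]
      -- read lemmas: the three dp reads return gWL of the index (when the guard holds)
      have hread : ∀ t : Int, 0 ≤ t → t < j → PySem.List.pyGetD dp t 0 = gWL t := by
        intro t ht0 htj
        have htL : t < (L : Int) := by omega
        rw [PySem.List.pyGetD_eq_getElem dp (i := t) 0 ht0 (by simp [hlen]; omega)]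
        have := hpre t.toNat (by omega)
        rw [List.getD_eq_getElem?_getD, List.getElem?_eq_getElem (by omega)] at this
        simp only [Option.getD_some] at this
        rw [this]
        congr 1
        omega
      have hstep : F dp j = dp.set j.toNat (gWL j) := by
        rw [hF]
        simp only
        have c1 : (1 ≤ j ∧ PySem.List.pyGetD dp (j - 1) 0 = 0) ↔ (1 ≤ j ∧ gWL (j - 1) = 0) := by
          constructor <;> rintro ⟨h, h'⟩ <;>
            exact ⟨h, by rw [hread (j-1) (by omega) (by omega)] at *; exact h'⟩
        have c3 : (3 ≤ j ∧ PySem.List.pyGetD dp (j - 3) 0 = 0) ↔ (3 ≤ j ∧ gWL (j - 3) = 0) := by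
          constructor <;> rintro ⟨h, h'⟩ <;>
            exact ⟨h, by rw [hread (j-3) (by omega) (by omega)] at *; exact h'⟩
        have c4 : (4 ≤ j ∧ PySem.List.pyGetD dp (j - 4) 0 = 0) ↔ (4 ≤ j ∧ gWL (j - 4) = 0) := by
          constructor <;> rintro ⟨h, h'⟩ <;>
            exact ⟨h, by rw [hread (j-4) (by omega) (by omega)] at *; exact h'⟩
        simp only [c1, c3, c4]
        have collapse : (if 1 ≤ j ∧ gWL (j - 1) = 0 then PySem.List.pySetD dp j 1
            else if 3 ≤ j ∧ gWL (j - 3) = 0 then PySem.List.pySetD dp j 1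
            else if 4 ≤ j ∧ gWL (j - 4) = 0 then PySem.List.pySetD dp j 1
            else PySem.List.pySetD dp j 0) =
            PySem.List.pySetD dp j (if 1 ≤ j ∧ gWL (j - 1) = 0 then 1
            else if 3 ≤ j ∧ gWL (j - 3) = 0 then 1
            else if 4 ≤ j ∧ gWL (j - 4) = 0 then 1 else 0) := by
          split_ifs <;> rfl
        rw [collapse, gWL_step j h2]
        exact PySem.List.pySetD_of_nonneg dp (gWL j) (by omega)
      rw [hstep]
      apply ih (j + 1) _ (by omega) (by omega) (by omega) (by simp [hlen])
      intro k hk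
      by_cases hkj : (k : Int) = j
      · have hk' : k = j.toNat := by omega
        subst hk'
        rw [List.getD_eq_getElem?_getD, List.getElem?_set_self (by simp [hlen]; omega)]
        simp only [Option.getD_some]
        congr 1
        omega
      · rw [List.getD_eq_getElem?_getD, List.getElem?_set_ne (by omega),
            ← List.getD_eq_getElem?_getD]
        exact hpre k (by omega)
    · rw [PySem.List.pyRange_one_eq_nil (by omega)]
      exact ⟨hlen, fun k hk => hpre k (by omega)⟩

theorem stone_spec : Claim_equal_stone := by
  intro n _ hpre
  unfold Pre_stone at hpre
  unfold Spec_stone stone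
  simp only
  set L : Nat := (n + 1).toNat with hL
  have hL2 : 2 ≤ L := by omega
  set dp2 : List Int :=
    PySem.List.pySetD (PySem.List.pySetD (List.replicate L (0 : Int)) 0 0) 1 1 with hdp2
  have hlen2 : dp2.length = L := by simp [hdp2]
  have hpre2 : ∀ k : Nat, (k : Int) < 2 → dp2.getD k 0 = gWL k := by
    intro k hk
    have hk01 : k = 0 ∨ k = 1 := by omega
    rcases hk01 with rfl | rfl <;>
      simp [hdp2, gWL, PySem.List.pySetD_of_nonneg, List.getD_eq_getElem?_getD,
        show 0 < L by omega, show 1 < L by omega]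
  obtain ⟨hlen', hval⟩ := stone_loop_inv L (n + 1) (by omega) 2 dp2 (by omega) (by omega) hlen2 hpre2
  have hv := hval n.toNat (by omega)
  rw [PySem.List.pyGetD_eq_getElem _ (i := n) 0 (by omega) (by rw [hlen']; omega)]
  rw [List.getD_eq_getElem?_getD, List.getElem?_eq_getElem (by rw [hlen']; omega)] at hv
  simp only [Option.getD_some] at hv
  rw [hv, show ((n.toNat : Int)) = n by omega]
  unfold stone_alt gWL
  rw [PySem.Int.mod_eq_emod_of_pos (by norm_num)]
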